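-- pv_equiv track=rewrite | github.com/philhanna/crossword | tools/user/grid_generator.py | line_runs_are_legal
-- ===== SOURCE A (Python) =====
-- from typing import Iterable, List, Optional, Sequence, Tuple
--
-- WHITE = "."
--
-- def line_runs_are_legal(line: Sequence[str]) -> bool:
--     """Final check: every maximal WHITE run has length >= 3."""
--     n = len(line)
--     i = 0
--     while i < n:
--         if line[i] == WHITE:
--             start = i
--             while i < n and line[i] == WHITE:
--                 i += 1
--             if i - start < 3:
--                 return False
--         else:
--             i += 1
--     return True
-- ===== SOURCE B (Python) =====
-- WHITE = "."
--
--
-- def line_runs_are_legal(line):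
--     """Final check: every maximal WHITE run has length >= 3.
--
--     Reduce the line to a two-symbol string padded with sentinels and test
--     for the forbidden patterns that characterise a short white run.
--     """
--     s = "#" + "".join("." if c == WHITE else "#" for c in line) + "#"
--     return "#.#" not in s and "#..#" not in s
-- ===== Notes on version B (the rewrite author's own statement) =====
-- stated objective: simpler
-- what changed: Replaces the manual index loop with nested whiles and start/end bookkeeping by a reduction to substring search: encode the line as a '.'/'#' string padded with '#' sentinels and test that neither forbidden pattern '#.#' nor '#..#' occurs.
import Mathlib
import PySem

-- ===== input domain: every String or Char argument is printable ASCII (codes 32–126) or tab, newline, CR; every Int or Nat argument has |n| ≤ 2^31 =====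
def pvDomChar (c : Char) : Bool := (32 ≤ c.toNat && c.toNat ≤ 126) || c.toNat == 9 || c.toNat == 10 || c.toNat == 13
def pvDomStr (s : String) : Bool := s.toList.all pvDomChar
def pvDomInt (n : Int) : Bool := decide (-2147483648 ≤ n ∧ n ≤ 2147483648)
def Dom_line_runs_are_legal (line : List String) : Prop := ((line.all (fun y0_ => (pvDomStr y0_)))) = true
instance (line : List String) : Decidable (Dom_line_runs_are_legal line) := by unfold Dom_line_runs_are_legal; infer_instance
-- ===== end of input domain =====

-- B drops A's index loop with nested whiles and start/end bookkeeping and instead reduces the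
-- task to substring search: encode the line as a '.'/'#' string padded with '#' sentinels and
-- check that neither forbidden pattern "#.#" nor "#..#" (a maximal white run of length 1 or 2)
-- occurs (objective: simpler).

-- ===== PORT A =====
-- inner 'while i < n and line[i] == WHITE: i += 1'
def pvSkipWhite (line : List String) (n i : Nat) : Nat :=
  if i < n ∧ line.getD i "" == "." then pvSkipWhite line n (i + 1) else i
termination_by n - i
decreasing_by omega

-- termination fact for the outer loop (the port cites it in decreasing_by)
theorem pvSkipWhite_ge (line : List String) (n i : Nat) : i ≤ pvSkipWhite line n i := by
  rw [pvSkipWhite]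
  by_cases h : i < n ∧ line.getD i "" == "."
  · rw [if_pos h]
    have := pvSkipWhite_ge line n (i + 1)
    omega
  · rw [if_neg h]
termination_by n - i
decreasing_by omega

-- outer while loop of A
def pvLoopA (line : List String) (n i : Nat) : Bool :=
  if h : i < n then
    if line.getD i "" == "." then
      let j := pvSkipWhite line n i
      if j - i < 3 then false else pvLoopA line n j
    else pvLoopA line n (i + 1)
  else true
termination_by n - i
decreasing_by
  · have h1 : i + 1 ≤ pvSkipWhite line n (i + 1) := pvSkipWhite_ge line n (i + 1)
    have h2 : pvSkipWhite line n i = pvSkipWhite line n (i + 1) := by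
      rw [pvSkipWhite]; simp_all
    omega
  · omega

def line_runs_are_legal (line : List String) : Bool :=
  pvLoopA line line.length 0

-- ===== PORT B =====
-- s = "#" + "".join("." if c == WHITE else "#" for c in line) + "#";
-- "".join of these one-character strings is exactly this list of characters.
-- 'pat not in s' is !PySem.Chars.isIn pat s (exact).
def line_runs_are_legal_alt (line : List String) : Bool :=
  let s : List Char := ['#'] ++ line.map (fun c => if c == "." then '.' else '#') ++ ['#']
  !(PySem.Chars.isIn ['#', '.', '#'] s) && !(PySem.Chars.isIn ['#', '.', '.', '#'] s)

-- ===== PRECONDITION & SPEC =====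
def Spec_line_runs_are_legal (line : List String) (out : Bool) : Prop := out = line_runs_are_legal_alt line
instance (line : List String) (out : Bool) : Decidable (Spec_line_runs_are_legal line out) := by unfold Spec_line_runs_are_legal; infer_instance

-- ===== CLAIM (what is proved, stated in full; the proofs are below) =====
def Claim_equal_line_runs_are_legal : Prop := ∀ (line : List String), Dom_line_runs_are_legal line → Spec_line_runs_are_legal line (line_runs_are_legal line)

-- ===== LEMMAS AND PROOFS =====

-- Proof-side middle ground: the run decomposition (groupby-style) of the line.
def pvGroups : List String → List (Bool × Nat)
  | [] => []
  | c :: rest =>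
    let k := (c == ".")
    let run := rest.takeWhile (fun y => (y == ".") == k)
    (k, run.length + 1) :: pvGroups (rest.dropWhile (fun y => (y == ".") == k))
termination_by l => l.length
decreasing_by
  have := List.length_dropWhile_le (fun y => (y == ".") == (c == ".")) rest
  simp_all

def pvGAll (l : List String) : Bool := (pvGroups l).all (fun g => !g.1 || decide (3 ≤ g.2))

theorem pv_dropWhile_eq_drop {α : Type} (p : α → Bool) (l : List α) :
    l.dropWhile p = l.drop (l.takeWhile p).length := by
  induction l with
  | nil => rfl
  | cons a t ih =>
    by_cases h : p a
    · simp [h, ih]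
    · simp [h]

theorem pvSkipWhite_char (xs : List String) (i : Nat) :
    pvSkipWhite xs xs.length i
      = i + ((xs.drop i).takeWhile (fun s => s == ".")).length := by
  rw [pvSkipWhite]
  by_cases h : i < xs.length ∧ xs.getD i "" == "."
  · rw [if_pos h]
    have ih := pvSkipWhite_char xs (i + 1)
    have hd : xs.drop i = xs[i] :: xs.drop (i + 1) := List.drop_eq_getElem_cons h.1
    have hw : (xs[i] == ".") = true := by
      have := h.2; rwa [List.getD_eq_getElem _ _ h.1] at this
    rw [hd]
    simp only [List.takeWhile_cons, hw, if_true, List.length_cons, ih]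
    omega
  · rw [if_neg h]
    by_cases hi : i < xs.length
    · have hw : (xs.getD i "" == ".") = false := by
        rcases Bool.eq_false_or_eq_true (xs.getD i "" == ".") with ht | hf
        · exact absurd ⟨hi, ht⟩ h
        · exact hf
      have hd : xs.drop i = xs[i] :: xs.drop (i + 1) := List.drop_eq_getElem_cons hi
      have hw' : (xs[i] == ".") = false := by rwa [List.getD_eq_getElem _ _ hi] at hw
      rw [hd]
      simp [hw']
    · have : xs.drop i = [] := List.drop_eq_nil_of_le (by omega)
      rw [this]; simp
termination_by xs.length - i
decreasing_by omega

theorem pvGroups_cons_white (c : String) (l : List String) (hc : (c == ".") = true) :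
    pvGroups (c :: l)
      = (true, (l.takeWhile (fun s => s == ".")).length + 1)
        :: pvGroups (l.dropWhile (fun s => s == ".")) := by
  rw [pvGroups]
  simp only [hc, beq_true]

theorem pvGroups_cons_nonwhite (c : String) (l : List String) (hc : (c == ".") = false) :
    pvGroups (c :: l)
      = (false, (l.takeWhile (fun s => !(s == "."))).length + 1)
        :: pvGroups (l.dropWhile (fun s => !(s == "."))) := by
  rw [pvGroups]
  simp only [hc, beq_false]

theorem pvG_cons_white (c : String) (l : List String) (hc : (c == ".") = true) :
    pvGAll (c :: l)
      = (decide (3 ≤ (l.takeWhile (fun s => s == ".")).length + 1)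
          && pvGAll (l.dropWhile (fun s => s == "."))) := by
  simp [pvGAll, pvGroups_cons_white c l hc]

theorem pvG_cons_nonwhite (c : String) (l : List String) (hc : (c == ".") = false) :
    pvGAll (c :: l) = pvGAll l := by
  have lhs : pvGAll (c :: l)
      = pvGAll (l.dropWhile (fun s => !(s == "."))) := by
    simp [pvGAll, pvGroups_cons_nonwhite c l hc]
  rw [lhs]
  cases l with
  | nil => simp
  | cons d l' =>
    by_cases hd : (d == ".") = true
    · rw [List.dropWhile_cons]
      simp [hd]
    · have hd' : (d == ".") = false := by
        simpa using hd
      rw [List.dropWhile_cons]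
      simp only [hd', Bool.not_false, if_true]
      have rhs : pvGAll (d :: l')
          = pvGAll (l'.dropWhile (fun s => !(s == "."))) := by
        simp [pvGAll, pvGroups_cons_nonwhite d l' hd']
      rw [rhs]

-- A's loop computes exactly the run check.
theorem pvLoopA_eq_gAll (xs : List String) (i : Nat) :
    pvLoopA xs xs.length i = pvGAll (xs.drop i) := by
  rw [pvLoopA]
  by_cases h : i < xs.length
  · rw [dif_pos h]
    have hd : xs.drop i = xs[i] :: xs.drop (i + 1) := List.drop_eq_getElem_cons h
    by_cases hw : (xs.getD i "" == ".") = true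
    · rw [if_pos hw]
      have hg : (xs[i] == ".") = true := by rwa [List.getD_eq_getElem _ _ h] at hw
      have hskip := pvSkipWhite_char xs i
      have hw2 : ((xs.drop i).takeWhile (fun s => s == ".")).length
          = ((xs.drop (i + 1)).takeWhile (fun s => s == ".")).length + 1 := by
        rw [hd, List.takeWhile_cons, hg]; simp
      set t := ((xs.drop (i + 1)).takeWhile (fun s => s == ".")).length with ht
      have hj : pvSkipWhite xs xs.length i = i + (t + 1) := by rw [hskip, hw2]
      have hdropj : xs.drop (i + (t + 1))
          = (xs.drop (i + 1)).dropWhile (fun s => s == ".") := by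
        rw [pv_dropWhile_eq_drop, ← ht, List.drop_drop]
        congr 1; omega
      have hB : pvGAll (xs.drop i)
          = (decide (3 ≤ t + 1)
              && pvGAll ((xs.drop (i + 1)).dropWhile (fun s => s == "."))) := by
        rw [hd, pvG_cons_white _ _ hg]
      simp only [hj]
      by_cases hlen : i + (t + 1) - i < 3
      · rw [if_pos hlen, hB]
        have : ¬ (3 ≤ t + 1) := by omega
        simp [this]
      · rw [if_neg hlen]
        have ih := pvLoopA_eq_gAll xs (i + (t + 1))
        rw [ih, hdropj, hB]
        have : (3 ≤ t + 1) := by omega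
        simp [this]
    · rw [if_neg hw]
      have hg : (xs[i] == ".") = false := by
        have : ¬ (xs[i] == ".") = true := fun ht => hw (by rwa [List.getD_eq_getElem _ _ h])
        simpa using this
      have ih := pvLoopA_eq_gAll xs (i + 1)
      rw [ih, hd, pvG_cons_nonwhite _ _ hg]
  · rw [dif_neg h]
    have : xs.drop i = [] := List.drop_eq_nil_of_le (by omega)
    rw [this]
    simp [pvGAll, pvGroups]
termination_by xs.length - i
decreasing_by
  · omega
  · omega

-- ----- infix facts for B's padded encoding -----

theorem pvInfix_cons_ne (q l : List Char) (c : Char) (hc : c ≠ '#') :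
    (('#' :: q) <:+: (c :: l)) ↔ (('#' :: q) <:+: l) := by
  rw [List.infix_cons_iff]
  constructor
  · rintro (h | h)
    · rw [List.cons_prefix_cons] at h
      exact absurd h.1.symm hc
    · exact h
  · exact Or.inr

theorem pvInfix_peel (q l : List Char) (m : Nat) :
    (('#' :: q) <:+: (List.replicate m '.' ++ l)) ↔ (('#' :: q) <:+: l) := by
  induction m with
  | zero => simp
  | succ n ih =>
    rw [List.replicate_succ, List.cons_append, pvInfix_cons_ne _ _ _ (by decide)]
    exact ih

theorem pvInfix_hash_hash (q l : List Char) :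
    (('#' :: '.' :: q) <:+: ('#' :: '#' :: l)) ↔ (('#' :: '.' :: q) <:+: ('#' :: l)) := by
  rw [List.infix_cons_iff]
  constructor
  · rintro (h | h)
    · rw [List.cons_prefix_cons] at h
      rcases h with ⟨-, h2⟩
      rw [List.cons_prefix_cons] at h2
      exact absurd h2.1 (by decide)
    · exact h
  · exact Or.inr

theorem pvPfx1 (k : Nat) (z : List Char) :
    ((['#', '.', '#'] <+: ('#' :: (List.replicate (k + 1) '.' ++ '#' :: z)))) ↔ k = 0 := by
  cases k with
  | zero => simp [List.replicate_succ, List.cons_prefix_cons]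
  | succ n => simp [List.replicate_succ, List.cons_prefix_cons]

theorem pvPfx2 (k : Nat) (z : List Char) :
    ((['#', '.', '.', '#'] <+: ('#' :: (List.replicate (k + 1) '.' ++ '#' :: z)))) ↔ k = 1 := by
  cases k with
  | zero => simp [List.replicate_succ, List.cons_prefix_cons]
  | succ n =>
    cases n with
    | zero => simp [List.replicate_succ, List.cons_prefix_cons]
    | succ m => simp [List.replicate_succ, List.cons_prefix_cons]

-- searching a padded run block: a hit is either the run being too short, or a hit after it
theorem pvIsIn_pad1 (k : Nat) (z : List Char) :
    PySem.Chars.isIn ['#', '.', '#'] ('#' :: (List.replicate (k + 1) '.' ++ '#' :: z))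
      = (decide (k = 0) || PySem.Chars.isIn ['#', '.', '#'] ('#' :: z)) := by
  rw [Bool.eq_iff_iff, PySem.Chars.isIn_iff_infix, List.infix_cons_iff, pvPfx1, pvInfix_peel]
  simp [PySem.Chars.isIn_iff_infix]

theorem pvIsIn_pad2 (k : Nat) (z : List Char) :
    PySem.Chars.isIn ['#', '.', '.', '#'] ('#' :: (List.replicate (k + 1) '.' ++ '#' :: z))
      = (decide (k = 1) || PySem.Chars.isIn ['#', '.', '.', '#'] ('#' :: z)) := by
  rw [Bool.eq_iff_iff, PySem.Chars.isIn_iff_infix, List.infix_cons_iff, pvPfx2, pvInfix_peel]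
  simp [PySem.Chars.isIn_iff_infix]

theorem pvIsIn_hash (p z : List Char) :
    PySem.Chars.isIn ('#' :: '.' :: p) ('#' :: '#' :: z)
      = PySem.Chars.isIn ('#' :: '.' :: p) ('#' :: z) := by
  rw [Bool.eq_iff_iff, PySem.Chars.isIn_iff_infix, PySem.Chars.isIn_iff_infix,
    pvInfix_hash_hash]

-- encoding helper
def pvEnc (l : List String) : List Char := l.map (fun c => if c == "." then '.' else '#')

theorem pvEnc_takeWhile (t : List String) :
    pvEnc (t.takeWhile (fun s => s == "."))
      = List.replicate (t.takeWhile (fun s => s == ".")).length '.' := by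
  rw [List.eq_replicate_iff]
  refine ⟨by simp [pvEnc], ?_⟩
  intro b hb
  simp only [pvEnc, List.mem_map] at hb
  rcases hb with ⟨s, hs, rfl⟩
  have := List.mem_takeWhile_imp hs
  simp [this]

theorem pvAlt_unfold (l : List String) :
    line_runs_are_legal_alt l
      = (!(PySem.Chars.isIn ['#', '.', '#'] ('#' :: (pvEnc l ++ ['#'])))
          && !(PySem.Chars.isIn ['#', '.', '.', '#'] ('#' :: (pvEnc l ++ ['#'])))) := rfl

theorem pvGAll_nil : pvGAll [] = true := by
  rw [pvGAll, pvGroups]; rfl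

-- B computes exactly the run check.
theorem pvAlt_eq_gAll (l : List String) : line_runs_are_legal_alt l = pvGAll l := by
  have main : ∀ n (l : List String), l.length ≤ n → line_runs_are_legal_alt l = pvGAll l := by
    intro n
    induction n with
    | zero =>
      intro l hl
      have : l = [] := List.eq_nil_of_length_eq_zero (by omega)
      subst this
      rw [pvGAll_nil]; rfl
    | succ n ih =>
      intro l hl
      cases l with
      | nil => rw [pvGAll_nil]; rfl
      | cons c t =>
        by_cases hc : (c == ".") = true
        · -- white head: peel the whole maximal run
          set k := (t.takeWhile (fun s => s == ".")).length with hk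
          set r := t.dropWhile (fun s => s == ".") with hr
          have hrlen : r.length ≤ n := by
            have hd := List.length_dropWhile_le (fun s => s == ".") t
            rw [← hr] at hd
            simp only [List.length_cons] at hl
            omega
          have henc : pvEnc (c :: t) = List.replicate (k + 1) '.' ++ pvEnc r := by
            have hceq : c = "." := by simpa using hc
            have h1 : pvEnc (c :: t) = '.' :: pvEnc t := by simp [pvEnc, hceq]
            have h2 : pvEnc t = List.replicate k '.' ++ pvEnc r := by
              conv_lhs => rw [← List.takeWhile_append_dropWhile (p := fun s => s == ".") (l := t)]
              rw [pvEnc, List.map_append, ← pvEnc, ← pvEnc, pvEnc_takeWhile, ← hr, ← hk]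
            rw [h1, h2, List.replicate_succ, List.cons_append]
          -- the tail of the padded string after the run starts with '#'
          obtain ⟨z, hz1⟩ : ∃ z : List Char, pvEnc r ++ ['#'] = '#' :: z := by
            cases hcr : r with
            | nil => exact ⟨[], by simp [pvEnc]⟩
            | cons d r' =>
              have hd : (d == ".") = false := by
                have := List.head_dropWhile_not (fun s => s == ".") (l := t)
                  (by simp [← hr, hcr])
                simpa [← hr, hcr] using this
              have hdne : ¬ d = "." := by simpa using hd
              exact ⟨pvEnc r' ++ ['#'], by simp [pvEnc, hdne]⟩
          have hpad : '#' :: (pvEnc (c :: t) ++ ['#'])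
              = '#' :: (List.replicate (k + 1) '.' ++ '#' :: z) := by
            rw [henc, List.append_assoc, hz1]
          rw [pvAlt_unfold, hpad, pvG_cons_white c t hc, ← hk, ← hr, ← ih r hrlen,
            pvAlt_unfold, hz1, pvIsIn_pad1, pvIsIn_pad2,
            pvIsIn_hash ['#'] z, pvIsIn_hash ['.', '#'] z]
          rw [Bool.eq_iff_iff]
          simp only [Bool.and_eq_true, Bool.not_eq_true', Bool.or_eq_false_iff,
            decide_eq_false_iff_not, decide_eq_true_eq]
          constructor
          · rintro ⟨⟨hk0, hb1⟩, hk1, hb2⟩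
            exact ⟨by omega, hb1, hb2⟩
          · rintro ⟨hk3, hb1, hb2⟩
            exact ⟨⟨by omega, hb1⟩, by omega, hb2⟩
        · -- non-white head: drop one cell
          have hc' : (c == ".") = false := by simpa using hc
          have hcne : ¬ c = "." := by simpa using hc'
          have henc : pvEnc (c :: t) = '#' :: pvEnc t := by simp [pvEnc, hcne]
          have hih := ih t (by simp only [List.length_cons] at hl; omega)
          rw [pvAlt_unfold, henc, pvG_cons_nonwhite c t hc', ← hih, pvAlt_unfold,
            List.cons_append, pvIsIn_hash ['#'], pvIsIn_hash ['.', '#']]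
  exact main l.length l le_rfl

-- ===== VERDICT (by name: the statement is the Claim_ definition above) =====
theorem line_runs_are_legal_spec : Claim_equal_line_runs_are_legal := by
  intro line _
  unfold Spec_line_runs_are_legal line_runs_are_legal
  rw [pvAlt_eq_gAll]
  simpa using pvLoopA_eq_gAll line 0
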